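-- pv_equiv track=rewrite | github.com/MrBrantCode/unitest_baseline | mut_generate/mist_train_taco/taco_18639/solution.py | maximize_zeroes_in_array
-- ===== SOURCE A (Python) =====
-- from collections import defaultdict
-- from math import gcd
--
-- def maximize_zeroes_in_array(n, a, b):
--     Pairs = defaultdict(int)
--     already = 0
--
--     for i in range(n):
--         if a[i] and b[i]:
--             b_val = -b[i]
--             a_val = a[i]
--             x = gcd(abs(b_val), abs(a_val))
--             bb = int(b_val / x)
--             aa = int(a_val / x)
--             if aa < 0:
--                 if bb < 0:
--                     Pairs[-bb, -aa] += 1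
--                 else:
--                     Pairs[-bb, -aa] += 1
--             else:
--                 Pairs[bb, aa] += 1
--         elif a[i] == 0 and b[i] == 0:
--             already += 1
--         elif a[i] == 0:
--             continue
--         else:
--             Pairs[0] += 1
--
--     X = list(Pairs.values())
--     if X:
--         return max(X) + already
--     else:
--         return already
-- ===== SOURCE B (Python) =====
-- from math import gcd
--
--
-- def maximize_zeroes_in_array(n, a, b):
--     # Collect one canonical key per pair that can be zeroed, sort the keys,
--     # then scan once for the longest run of equal keys.
--     keys = []
--     already = 0
--     for i in range(n):
--         ai = a[i]
--         bi = b[i]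
--         if ai and bi:
--             x = gcd(abs(ai), abs(bi))
--             bb = int(-bi / x)
--             aa = int(ai / x)
--             if aa < 0:
--                 bb = -bb
--                 aa = -aa
--             keys.append((bb, aa))
--         elif ai == 0 and bi == 0:
--             already += 1
--         elif bi == 0:
--             keys.append((0, 0))
--     keys.sort()
--     best = 0
--     run = 0
--     prev = None
--     for k in keys:
--         run = run + 1 if k == prev else 1
--         if run > best:
--             best = run
--         prev = k
--     return best + already
-- ===== Notes on version B (the rewrite author's own statement) =====
-- stated objective: alternative
-- what changed: B replaces A's defaultdict counter and max-over-values by a flat list of canonical slope keys that is sorted once and scanned for the longest run of equal keys.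
import Mathlib
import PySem

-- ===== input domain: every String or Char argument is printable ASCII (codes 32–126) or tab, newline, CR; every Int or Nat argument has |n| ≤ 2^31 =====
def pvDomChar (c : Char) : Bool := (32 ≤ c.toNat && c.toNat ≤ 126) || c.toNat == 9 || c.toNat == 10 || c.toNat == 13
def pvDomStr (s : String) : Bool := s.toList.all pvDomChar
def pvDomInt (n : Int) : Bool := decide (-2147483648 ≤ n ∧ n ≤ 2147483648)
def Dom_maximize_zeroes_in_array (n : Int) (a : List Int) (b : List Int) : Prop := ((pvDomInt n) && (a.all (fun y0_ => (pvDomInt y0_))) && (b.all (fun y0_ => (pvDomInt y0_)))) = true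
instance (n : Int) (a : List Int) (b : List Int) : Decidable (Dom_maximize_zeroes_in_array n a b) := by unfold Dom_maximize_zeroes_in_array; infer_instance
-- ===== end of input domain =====

-- B replaces A's hash-map counter (defaultdict + max over its values) by a sorted list of
-- canonical keys scanned once for the longest run of equal keys; same return value, no speed claim.
-- ===== PORT A =====
def maximize_zeroes_in_array (n : Int) (a : List Int) (b : List Int) : Int :=
  let r := (PySem.List.pyRange 0 n 1).foldl (fun (s : PySem.Dict (Option (Int × Int)) Int × Int) i =>
    let ai := PySem.List.pyGetD a i 0
    let bi := PySem.List.pyGetD b i 0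
    if ai ≠ 0 ∧ bi ≠ 0 then
      let b_val := -bi
      let a_val := ai
      let x : Int := (Nat.gcd b_val.natAbs a_val.natAbs : Int)
      let bb := PySem.Int.truncdiv b_val x
      let aa := PySem.Int.truncdiv a_val x
      if aa < 0 then
        if bb < 0 then (s.1.modify (some (-bb, -aa)) 0 (· + 1), s.2)
        else (s.1.modify (some (-bb, -aa)) 0 (· + 1), s.2)
      else (s.1.modify (some (bb, aa)) 0 (· + 1), s.2)
    else if ai = 0 ∧ bi = 0 then (s.1, s.2 + 1)
    else if ai = 0 then s
    else (s.1.modify none 0 (· + 1), s.2)) (PySem.Dict.empty, 0)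
  let X := r.1.values
  match PySem.List.max? X (fun y => y) with
  | some m => m + r.2
  | none => r.2

-- ===== PORT B =====
def maximize_zeroes_in_array_alt (n : Int) (a : List Int) (b : List Int) : Int :=
  let r := (PySem.List.pyRange 0 n 1).foldl (fun (s : List (Int × Int) × Int) i =>
    let ai := PySem.List.pyGetD a i 0
    let bi := PySem.List.pyGetD b i 0
    if ai ≠ 0 ∧ bi ≠ 0 then
      let x : Int := (Nat.gcd ai.natAbs bi.natAbs : Int)
      let bb := PySem.Int.truncdiv (-bi) x
      let aa := PySem.Int.truncdiv ai x
      if aa < 0 then (s.1 ++ [(-bb, -aa)], s.2) else (s.1 ++ [(bb, aa)], s.2)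
    else if ai = 0 ∧ bi = 0 then (s.1, s.2 + 1)
    else if bi = 0 then (s.1 ++ [(0, 0)], s.2)
    else s) ([], 0)
  let sks := PySem.List.sorted2 r.1 (fun t => t.1) (fun t => t.2)
  let f := sks.foldl (fun (st : Int × Int × Option (Int × Int)) k =>
      let run := if some k = st.2.2 then st.2.1 + 1 else 1
      let best := if run > st.1 then run else st.1
      (best, run, some k)) (0, 0, none)
  f.1 + r.2

-- ===== PRECONDITION & SPEC =====
-- Pre_ excludes exactly the inputs where Python A raises IndexError: n larger than a list length.
def Pre_maximize_zeroes_in_array (n : Int) (a : List Int) (b : List Int) : Prop :=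
  n ≤ (a.length : Int) ∧ n ≤ (b.length : Int)
instance (n : Int) (a : List Int) (b : List Int) : Decidable (Pre_maximize_zeroes_in_array n a b) := by unfold Pre_maximize_zeroes_in_array; infer_instance
def pvWitness_maximize_zeroes_in_array : Int × List Int × List Int := (4, [1, 2, 0, 3], [2, 4, 0, 0])

def Spec_maximize_zeroes_in_array (n : Int) (a : List Int) (b : List Int) (out : Int) : Prop := out = maximize_zeroes_in_array_alt n a b
instance (n : Int) (a : List Int) (b : List Int) (out : Int) : Decidable (Spec_maximize_zeroes_in_array n a b out) := by unfold Spec_maximize_zeroes_in_array; infer_instance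

-- ===== CLAIM (what is proved, stated in full; the proofs are below) =====
def Claim_equal_maximize_zeroes_in_array : Prop := ∀ (n : Int) (a : List Int) (b : List Int), Dom_maximize_zeroes_in_array n a b → Pre_maximize_zeroes_in_array n a b → Spec_maximize_zeroes_in_array n a b (maximize_zeroes_in_array n a b)

-- ===== LEMMAS AND PROOFS =====

-- the list of (a[i], b[i]) pairs the loops of both ports traverse
def pvL (n : Int) (a : List Int) (b : List Int) : List (Int × Int) :=
  (List.range n.toNat).map (fun k => (PySem.List.pyGetD a (k : Int) 0, PySem.List.pyGetD b (k : Int) 0))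

-- the canonical slope key B appends for a contributing pair ((0,0) = the b==0 bucket)
def pvNormKey (ai bi : Int) : Int × Int :=
  let x : Int := (Nat.gcd ai.natAbs bi.natAbs : Int)
  let bb := PySem.Int.truncdiv (-bi) x
  let aa := PySem.Int.truncdiv ai x
  if aa < 0 then (-bb, -aa) else (bb, aa)

def pvKeyB? (p : Int × Int) : Option (Int × Int) :=
  if p.1 ≠ 0 ∧ p.2 ≠ 0 then some (pvNormKey p.1 p.2)
  else if p.1 = 0 ∧ p.2 = 0 then none
  else if p.2 = 0 then some (0, 0)
  else none

-- A's dict key for the same pair: the int key 0 is `none`, a slope tuple is `some`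
def pvEmb (k : Int × Int) : Option (Int × Int) := if k = (0, 0) then none else some k
def pvKeyA? (p : Int × Int) : Option (Option (Int × Int)) := (pvKeyB? p).map pvEmb

def pvG (alr : Int) (p : Int × Int) : Int := if p.1 = 0 ∧ p.2 = 0 then alr + 1 else alr
def pvFA (d : PySem.Dict (Option (Int × Int)) Int) (p : Int × Int) : PySem.Dict (Option (Int × Int)) Int :=
  match pvKeyA? p with
  | some k => d.modify k 0 (· + 1)
  | none => d
def pvFB (ks : List (Int × Int)) (p : Int × Int) : List (Int × Int) :=
  match pvKeyB? p with
  | some k => ks ++ [k]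
  | none => ks

def pvKs (n : Int) (a : List Int) (b : List Int) : List (Int × Int) := (pvL n a b).filterMap pvKeyB?
def pvAlr (n : Int) (a : List Int) (b : List Int) : Int := (pvL n a b).foldl pvG 0

def pvScanStep (st : Int × Int × Option (Int × Int)) (k : Int × Int) : Int × Int × Option (Int × Int) :=
  let run := if some k = st.2.2 then st.2.1 + 1 else 1
  let best := if run > st.1 then run else st.1
  (best, run, some k)

-- the comparator sorted2 uses on the canonical keys (lexicographic on the pair)
def pvLt2 (p q : Int × Int) : Bool :=
  decide (p.1 < q.1) || (!decide (q.1 < p.1) && decide (p.2 < q.2))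

def pvMaxD : Option Int → Int
  | some m => m
  | none => 0

lemma pvRange_eq (n : Int) : PySem.List.pyRange 0 n 1 = (List.range n.toNat).map (fun (k : Nat) => (k : Int)) := by
  by_cases h : 0 ≤ n
  · obtain ⟨m, rfl⟩ := Int.eq_ofNat_of_zero_le h
    rw [show ((m : Int)).toNat = m from rfl]
    exact PySem.List.pyRange_zero_natCast m
  · have h0 : n.toNat = 0 := by omega
    rw [h0]
    simp [PySem.List.pyRange, show ¬ (0:Int) < n by omega]

lemma pvNormKey_snd_ne (ai bi : Int) (ha : ai ≠ 0) : (pvNormKey ai bi).2 ≠ 0 := by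
  have hx : (Nat.gcd ai.natAbs bi.natAbs : Int) ∣ ai := by
    simpa [Int.gcd] using Int.gcd_dvd_left (a := ai) (b := bi)
  have htd : PySem.Int.truncdiv ai (Nat.gcd ai.natAbs bi.natAbs : Int)
      = ai / (Nat.gcd ai.natAbs bi.natAbs : Int) := Int.tdiv_eq_ediv_of_dvd hx
  have haa : ai / (Nat.gcd ai.natAbs bi.natAbs : Int) ≠ 0 := by
    intro h0
    have hm := Int.ediv_mul_cancel hx
    rw [h0, zero_mul] at hm
    exact ha hm.symm
  unfold pvNormKey
  simp only [htd]
  split_ifs <;> simpa using haa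

lemma pvStepA_split (s : PySem.Dict (Option (Int × Int)) Int × Int) (ai bi : Int) :
    (if ai ≠ 0 ∧ bi ≠ 0 then
      if PySem.Int.truncdiv ai (Nat.gcd (-bi).natAbs ai.natAbs : Int) < 0 then
        if PySem.Int.truncdiv (-bi) (Nat.gcd (-bi).natAbs ai.natAbs : Int) < 0 then
          (s.1.modify (some (-PySem.Int.truncdiv (-bi) (Nat.gcd (-bi).natAbs ai.natAbs : Int),
            -PySem.Int.truncdiv ai (Nat.gcd (-bi).natAbs ai.natAbs : Int))) 0 (· + 1), s.2)
        else
          (s.1.modify (some (-PySem.Int.truncdiv (-bi) (Nat.gcd (-bi).natAbs ai.natAbs : Int),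
            -PySem.Int.truncdiv ai (Nat.gcd (-bi).natAbs ai.natAbs : Int))) 0 (· + 1), s.2)
      else
        (s.1.modify (some (PySem.Int.truncdiv (-bi) (Nat.gcd (-bi).natAbs ai.natAbs : Int),
          PySem.Int.truncdiv ai (Nat.gcd (-bi).natAbs ai.natAbs : Int))) 0 (· + 1), s.2)
    else if ai = 0 ∧ bi = 0 then (s.1, s.2 + 1)
    else if ai = 0 then s
    else (s.1.modify none 0 (· + 1), s.2)) = (pvFA s.1 (ai, bi), pvG s.2 (ai, bi)) := by
  by_cases h1 : ai ≠ 0 ∧ bi ≠ 0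
  · have hne : pvNormKey ai bi ≠ (0, 0) := by
      intro he
      exact pvNormKey_snd_ne ai bi h1.1 (by rw [he])
    have hg : ¬ (ai = 0 ∧ bi = 0) := fun hc => h1.1 hc.1
    have hgcd : Nat.gcd (-bi).natAbs ai.natAbs = Nat.gcd ai.natAbs bi.natAbs := by
      rw [Int.natAbs_neg, Nat.gcd_comm]
    have hk : pvKeyA? (ai, bi) = some (some (pvNormKey ai bi)) := by
      simp [pvKeyA?, pvKeyB?, h1, pvEmb, hne]
    simp only [pvFA, pvG, hk, h1, hgcd]
    unfold pvNormKey
    simp only []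
    split_ifs <;> first | rfl | simp_all
  · by_cases hz : ai = 0 ∧ bi = 0
    · simp [pvFA, pvKeyA?, pvKeyB?, pvG, hz]
    · by_cases ha0 : ai = 0
      · have hb0 : ¬ bi = 0 := fun hc => hz ⟨ha0, hc⟩
        simp [pvFA, pvKeyA?, pvKeyB?, pvG, ha0, hb0]
      · have hb0 : bi = 0 := by tauto
        simp [pvFA, pvKeyA?, pvKeyB?, pvG, pvEmb, ha0, hb0]

lemma pvStepB_split (s : List (Int × Int) × Int) (ai bi : Int) :
    (if ai ≠ 0 ∧ bi ≠ 0 then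
      if PySem.Int.truncdiv ai (Nat.gcd ai.natAbs bi.natAbs : Int) < 0 then
        (s.1 ++ [(-PySem.Int.truncdiv (-bi) (Nat.gcd ai.natAbs bi.natAbs : Int),
          -PySem.Int.truncdiv ai (Nat.gcd ai.natAbs bi.natAbs : Int))], s.2)
      else
        (s.1 ++ [(PySem.Int.truncdiv (-bi) (Nat.gcd ai.natAbs bi.natAbs : Int),
          PySem.Int.truncdiv ai (Nat.gcd ai.natAbs bi.natAbs : Int))], s.2)
    else if ai = 0 ∧ bi = 0 then (s.1, s.2 + 1)
    else if bi = 0 then (s.1 ++ [(0, 0)], s.2)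
    else s) = (pvFB s.1 (ai, bi), pvG s.2 (ai, bi)) := by
  by_cases h1 : ai ≠ 0 ∧ bi ≠ 0
  · have hg : ¬ (ai = 0 ∧ bi = 0) := fun hc => h1.1 hc.1
    simp only [pvFB, pvKeyB?, pvG, h1]
    unfold pvNormKey
    simp only []
    split_ifs <;> first | rfl | simp_all
  · by_cases hz : ai = 0 ∧ bi = 0
    · simp [pvFB, pvKeyB?, pvG, hz]
    · by_cases hb0 : bi = 0
      · have ha' : ai ≠ 0 := fun he => hz ⟨he, hb0⟩
        simp [pvFB, pvKeyB?, pvG, hb0, ha']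
      · by_cases ha : ai = 0
        · simp [pvFB, pvKeyB?, pvG, hb0, ha]
        · exact absurd ⟨ha, hb0⟩ h1

lemma pvFoldFA (l : List (Int × Int)) :
    ∀ d, l.foldl pvFA d = (l.filterMap pvKeyA?).foldl (fun d k => d.modify k 0 (· + 1)) d := by
  induction l with
  | nil => intro d; rfl
  | cons p l ih =>
    intro d
    rw [List.foldl_cons, List.filterMap_cons]
    cases hk : pvKeyA? p with
    | none =>
      have hfa : pvFA d p = d := by unfold pvFA; rw [hk]
      rw [hfa, ih]
    | some k =>
      have hfa : pvFA d p = d.modify k 0 (· + 1) := by unfold pvFA; rw [hk]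
      rw [hfa, ih, List.foldl_cons]

lemma pvFoldFB (l : List (Int × Int)) :
    ∀ acc, l.foldl pvFB acc = acc ++ l.filterMap pvKeyB? := by
  induction l with
  | nil => intro acc; simp
  | cons p l ih =>
    intro acc
    rw [List.foldl_cons, List.filterMap_cons]
    cases hk : pvKeyB? p with
    | none =>
      have hfb : pvFB acc p = acc := by unfold pvFB; rw [hk]
      rw [hfb, ih]
    | some k =>
      have hfb : pvFB acc p = acc ++ [k] := by unfold pvFB; rw [hk]
      rw [hfb, ih]
      simp [List.append_assoc]

lemma pvFoldAB {σ₁ σ₂ : Type} (fa : σ₁ → (Int × Int) → σ₁) (g : σ₂ → (Int × Int) → σ₂)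
    (a b : List Int) (l : List Nat) (i1 : σ₁) (i2 : σ₂) :
    (l.map (fun (k : Nat) => (k : Int))).foldl
      (fun s i => (fa s.1 (PySem.List.pyGetD a i 0, PySem.List.pyGetD b i 0),
                   g s.2 (PySem.List.pyGetD a i 0, PySem.List.pyGetD b i 0))) (i1, i2)
    = ((l.map (fun k => (PySem.List.pyGetD a (k : Int) 0, PySem.List.pyGetD b (k : Int) 0))).foldl fa i1,
       (l.map (fun k => (PySem.List.pyGetD a (k : Int) 0, PySem.List.pyGetD b (k : Int) 0))).foldl g i2) := by
  induction l generalizing i1 i2 with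
  | nil => rfl
  | cons x l ih =>
    exact ih _ _

lemma pvPortA_char (n : Int) (a : List Int) (b : List Int) :
    maximize_zeroes_in_array n a b =
      pvMaxD (PySem.List.max? ((PySem.Dict.counter ((pvKs n a b).map pvEmb)).values) (fun y => y))
        + pvAlr n a b := by
  unfold maximize_zeroes_in_array
  rw [pvRange_eq]
  simp only [pvStepA_split]
  rw [pvFoldAB pvFA pvG a b (List.range n.toNat) PySem.Dict.empty 0]
  rw [show (List.range n.toNat).map (fun k => (PySem.List.pyGetD a (k : Int) 0, PySem.List.pyGetD b (k : Int) 0)) = pvL n a b from rfl]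
  rw [pvFoldFA]
  rw [show (pvL n a b).filterMap pvKeyA? = (pvKs n a b).map pvEmb from by
    unfold pvKs pvKeyA?
    rw [List.map_filterMap]]
  show (match PySem.List.max? ((((pvKs n a b).map pvEmb).foldl (fun d k => d.modify k 0 (· + 1)) PySem.Dict.empty).values) (fun y => y) with
    | some m => m + pvAlr n a b
    | none => pvAlr n a b) =
    pvMaxD (PySem.List.max? ((PySem.Dict.counter ((pvKs n a b).map pvEmb)).values) (fun y => y)) + pvAlr n a b
  rw [← PySem.Dict.counter_eq_foldl]
  rcases hm : PySem.List.max? ((PySem.Dict.counter ((pvKs n a b).map pvEmb)).values) (fun y => y) with _ | m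
  · simp [pvMaxD]
  · simp [pvMaxD]

lemma pvPortB_char (n : Int) (a : List Int) (b : List Int) :
    maximize_zeroes_in_array_alt n a b =
      ((PySem.List.sorted2 (pvKs n a b) (fun t => t.1) (fun t => t.2)).foldl pvScanStep (0, 0, none)).1
        + pvAlr n a b := by
  unfold maximize_zeroes_in_array_alt
  rw [pvRange_eq]
  simp only [pvStepB_split]
  rw [pvFoldAB pvFB pvG a b (List.range n.toNat) ([] : List (Int × Int)) 0]
  rw [show (List.range n.toNat).map (fun k => (PySem.List.pyGetD a (k : Int) 0, PySem.List.pyGetD b (k : Int) 0)) = pvL n a b from rfl]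
  rw [pvFoldFB, List.nil_append]
  rfl

-- order facts about the comparator
lemma pvLt2_iff (p q : Int × Int) : pvLt2 p q = true ↔ (p.1 < q.1 ∨ (p.1 = q.1 ∧ p.2 < q.2)) := by
  simp only [pvLt2, Bool.or_eq_true, Bool.and_eq_true, Bool.not_eq_true', decide_eq_true_eq,
    decide_eq_false_iff_not]
  omega

lemma pvLt2_false_iff (p q : Int × Int) : pvLt2 p q = false ↔ ¬ (p.1 < q.1 ∨ (p.1 = q.1 ∧ p.2 < q.2)) := by
  have h := pvLt2_iff p q
  cases hb : pvLt2 p q <;> simp_all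

lemma pvLt2_antisymm {p q : Int × Int} (h1 : pvLt2 p q = false) (h2 : pvLt2 q p = false) : p = q := by
  rw [pvLt2_false_iff] at h1 h2
  have e1 : p.1 = q.1 := by omega
  have e2 : p.2 = q.2 := by omega
  exact Prod.ext e1 e2

lemma pvPairwise_insertBy (x : Int × Int) (ys : List (Int × Int))
    (h : ys.Pairwise (fun p q => pvLt2 q p = false)) :
    (PySem.List.insertBy pvLt2 x ys).Pairwise (fun p q => pvLt2 q p = false) := by
  induction ys with
  | nil => simp [PySem.List.insertBy]
  | cons y ys ih =>
    rw [List.pairwise_cons] at h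
    by_cases hxy : pvLt2 x y = true
    · rw [show PySem.List.insertBy pvLt2 x (y :: ys) = x :: y :: ys by
        simp [PySem.List.insertBy, hxy]]
      refine List.Pairwise.cons ?_ (List.Pairwise.cons h.1 h.2)
      intro z hz
      rcases List.mem_cons.mp hz with rfl | hz'
      · rw [pvLt2_false_iff]
        rw [pvLt2_iff] at hxy
        omega
      · have hzy := h.1 z hz'
        rw [pvLt2_false_iff] at hzy ⊢
        rw [pvLt2_iff] at hxy
        omega
    · have hxy' : pvLt2 x y = false := by
        cases hb : pvLt2 x y
        · rfl
        · exact absurd hb hxy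
      rw [show PySem.List.insertBy pvLt2 x (y :: ys) = y :: PySem.List.insertBy pvLt2 x ys by
        simp [PySem.List.insertBy, hxy']]
      refine List.Pairwise.cons ?_ (ih h.2)
      intro z hz
      rcases (PySem.List.mem_insertBy pvLt2 x z ys).mp hz with rfl | hz'
      · exact hxy'
      · exact h.1 z hz' 

lemma pvSorted2_eq (ks : List (Int × Int)) :
    PySem.List.sorted2 ks (fun t => t.1) (fun t => t.2)
      = ks.foldl (fun acc x => PySem.List.insertBy pvLt2 x acc) [] := by
  rfl

lemma pvPairwise_sorted2 (ks : List (Int × Int)) :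
    (PySem.List.sorted2 ks (fun t => t.1) (fun t => t.2)).Pairwise (fun p q => pvLt2 q p = false) := by
  rw [pvSorted2_eq]
  suffices hgen : ∀ (l : List (Int × Int)) (acc : List (Int × Int)),
      acc.Pairwise (fun p q => pvLt2 q p = false) →
      (l.foldl (fun acc x => PySem.List.insertBy pvLt2 x acc) acc).Pairwise (fun p q => pvLt2 q p = false) by
    exact hgen ks [] (by simp)
  intro l
  induction l with
  | nil => intro acc hacc; simpa using hacc
  | cons x l ih =>
    intro acc hacc
    exact ih _ (pvPairwise_insertBy x acc hacc)

lemma pvScan_invariant (s : List (Int × Int)) (h : s.Pairwise (fun p q => pvLt2 q p = false)) :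
    (s = [] ∧ s.foldl pvScanStep (0, 0, none) = (0, 0, none)) ∨
    (∃ p, p ∈ s ∧ (∀ x ∈ s, pvLt2 p x = false) ∧
      (s.foldl pvScanStep (0, 0, none)).2.2 = some p ∧
      (s.foldl pvScanStep (0, 0, none)).2.1 = (s.count p : Int) ∧
      (∃ j ∈ s, (s.foldl pvScanStep (0, 0, none)).1 = (s.count j : Int)) ∧
      (∀ j ∈ s, (s.count j : Int) ≤ (s.foldl pvScanStep (0, 0, none)).1)) := by
  induction s using List.reverseRecOn with
  | nil => left; exact ⟨rfl, rfl⟩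
  | append_singleton s k ih =>
    rw [List.pairwise_append] at h
    have hps := h.1
    have hall : ∀ x ∈ s, pvLt2 k x = false := by
      intro x hx
      exact h.2.2 x hx k (by simp)
    right
    rw [List.foldl_append, List.foldl_cons, List.foldl_nil]
    rcases ih hps with ⟨hnil, _⟩ | ⟨p, hpmem, hpmax, hprev, hrun, ⟨j, hj, hbest⟩, hub⟩
    · subst hnil
      rw [List.foldl_nil]
      have hstep : pvScanStep (0, 0, none) k = (1, 1, some k) := by
        simp [pvScanStep]
      rw [hstep]
      refine ⟨k, by simp, ?_, rfl, by simp, ⟨k, by simp, by simp⟩, ?_⟩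
      · intro x hx
        have hxk : x = k := by simpa using hx
        subst hxk
        rw [pvLt2_false_iff]; omega
      · intro j' hj'
        have hjk : j' = k := by simpa using hj'
        rw [hjk]
        simp
    · set st := s.foldl pvScanStep (0, 0, none) with hstdef
      by_cases hk : k = p
      · subst hk
        have hstep : pvScanStep st k = (if st.2.1 + 1 > st.1 then st.2.1 + 1 else st.1, st.2.1 + 1, some k) := by
          simp [pvScanStep, hprev]
        rw [hstep]
        have hck : (s ++ [k]).count k = s.count k + 1 := by
          simp [List.count_append]
        refine ⟨k, by simp, ?_, rfl, ?_, ?_, ?_⟩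
        · intro x hx
          rcases List.mem_append.mp hx with hx' | hx'
          · exact hpmax x hx'
          · have hxk : x = k := by simpa using hx'
            subst hxk
            rw [pvLt2_false_iff]; omega
        · show st.2.1 + 1 = ((s ++ [k]).count k : Int)
          rw [hck, hrun]
          push_cast
          omega
        · by_cases hgt : st.2.1 + 1 > st.1
          · refine ⟨k, by simp, ?_⟩
            show (if st.2.1 + 1 > st.1 then st.2.1 + 1 else st.1) = ((s ++ [k]).count k : Int)
            rw [if_pos hgt, hck, hrun]
            push_cast
            omega
          · have hjk : j ≠ k := by
              intro he
              subst he
              rw [hbest, hrun] at hgt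
              omega
            refine ⟨j, List.mem_append.mpr (Or.inl hj), ?_⟩
            show (if st.2.1 + 1 > st.1 then st.2.1 + 1 else st.1) = ((s ++ [k]).count j : Int)
            have hcj : (s ++ [k]).count j = s.count j := by
              simp [List.count_append, List.count_eq_zero, hjk]
            rw [if_neg hgt, hcj, hbest]
        · intro j' hj'
          show ((s ++ [k]).count j' : Int) ≤ (if st.2.1 + 1 > st.1 then st.2.1 + 1 else st.1)
          by_cases hje : j' = k
          · subst hje
            rw [hck]
            have h6 := hrun
            by_cases hc : st.2.1 + 1 > st.1 <;> simp only [hc, if_true, if_false] <;> push_cast at * <;> omega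
          · have hjs : j' ∈ s := by
              rcases List.mem_append.mp hj' with hx | hx
              · exact hx
              · exact absurd (by simpa using hx) hje
            have h5 := hub j' hjs
            have hcj : (s ++ [k]).count j' = s.count j' := by
              simp [List.count_append, List.count_eq_zero, hje]
            rw [hcj]
            by_cases hc : st.2.1 + 1 > st.1 <;> simp only [hc, if_true, if_false] <;> push_cast at * <;> omega
      · have hknotin : k ∉ s := by
          intro hkin
          have h1 := hpmax k hkin
          have h2 := hall p hpmem
          exact hk (pvLt2_antisymm h2 h1)
        have hprev_ne : some k ≠ st.2.2 := by
          rw [hprev]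
          simp [hk]
        have hbest_ge : (1 : Int) ≤ st.1 := by
          have hcj : 0 < s.count j := List.count_pos_iff.mpr hj
          rw [hbest]
          omega
        have hnot : ¬ ((1 : Int) > st.1) := by omega
        have hstep : pvScanStep st k = (st.1, 1, some k) := by
          simp only [pvScanStep, if_neg hprev_ne]
          rw [if_neg hnot]
        rw [hstep]
        have hck : (s ++ [k]).count k = 1 := by
          simp [List.count_append, List.count_eq_zero.mpr hknotin]
        refine ⟨k, by simp, ?_, rfl, ?_, ?_, ?_⟩
        · intro x hx
          rcases List.mem_append.mp hx with hx' | hx'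
          · exact hall x hx'
          · have hxk : x = k := by simpa using hx'
            subst hxk
            rw [pvLt2_false_iff]; omega
        · show (1 : Int) = ((s ++ [k]).count k : Int)
          rw [hck]
          simp
        · refine ⟨j, List.mem_append.mpr (Or.inl hj), ?_⟩
          have hjk : j ≠ k := fun he => hknotin (he ▸ hj)
          have hcj : (s ++ [k]).count j = s.count j := by
            simp [List.count_append, List.count_eq_zero, hjk]
          show st.1 = ((s ++ [k]).count j : Int)
          rw [hcj, hbest]
        · intro j' hj'
          show ((s ++ [k]).count j' : Int) ≤ st.1
          by_cases hje : j' = k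
          · subst hje
            rw [hck]
            omega
          · have hjs : j' ∈ s := by
              rcases List.mem_append.mp hj' with hx | hx
              · exact hx
              · exact absurd (by simpa using hx) hje
            have h5 := hub j' hjs
            have hcj : (s ++ [k]).count j' = s.count j' := by
              simp [List.count_append, List.count_eq_zero, hje]
            rw [hcj]
            exact h5

lemma pvEmb_injective : Function.Injective pvEmb := by
  intro x y h
  unfold pvEmb at h
  split_ifs at h with hx hy hy <;> simp_all

lemma pvCore (ks : List (Int × Int)) :
    pvMaxD (PySem.List.max? ((PySem.Dict.counter (ks.map pvEmb)).values) (fun y => y)) =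
    ((PySem.List.sorted2 ks (fun t => t.1) (fun t => t.2)).foldl pvScanStep (0, 0, none)).1 := by
  have hvals : (PySem.Dict.counter (ks.map pvEmb)).values
      = (PySem.Set.ofList (ks.map pvEmb)).map (fun k => (((ks.map pvEmb).count k : Nat) : Int)) := by
    show ((PySem.Dict.counter (ks.map pvEmb)).items).map (·.2) = _
    rw [PySem.Dict.items_counter, List.map_map]
    rfl
  by_cases hks : ks = []
  · subst hks
    rfl
  · set s := PySem.List.sorted2 ks (fun t => t.1) (fun t => t.2) with hsdef
    have hperm : s.Perm ks := PySem.List.sorted2_perm ks _ _ false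
    have hpw := pvPairwise_sorted2 ks
    have hsne : s ≠ [] := by
      intro h0
      rw [h0] at hperm
      exact hks (List.nil_perm.mp hperm)
    rcases pvScan_invariant s hpw with ⟨h0, _⟩ | ⟨p, hpmem, _hpmax, _hprev, _hrun, ⟨j, hj, hbest⟩, hub⟩
    · exact absurd h0 hsne
    rw [hvals]
    rcases hm : PySem.List.max? ((PySem.Set.ofList (ks.map pvEmb)).map (fun k => (((ks.map pvEmb).count k : Nat) : Int))) (fun y => y) with _ | m
    · exfalso
      rw [PySem.List.max?_eq_none_iff] at hm
      obtain ⟨x, hx⟩ := List.exists_mem_of_ne_nil ks hks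
      have hmem : pvEmb x ∈ PySem.Set.ofList (ks.map pvEmb) :=
        (PySem.Set.mem_ofList _ _).mpr (List.mem_map_of_mem hx)
      have : (((ks.map pvEmb).count (pvEmb x) : Nat) : Int) ∈
          (PySem.Set.ofList (ks.map pvEmb)).map (fun k => (((ks.map pvEmb).count k : Nat) : Int)) :=
        List.mem_map_of_mem hmem
      rw [hm] at this
      simp at this
    · have hmmem := PySem.List.max?_mem hm
      have hmub := PySem.List.max?_isMax hm
      obtain ⟨kk, hkk, hmkk⟩ := List.mem_map.mp hmmem
      obtain ⟨k0, hk0, hk0e⟩ := List.mem_map.mp ((PySem.Set.mem_ofList _ _).mp hkk)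
      have hcnt : (ks.map pvEmb).count kk = ks.count k0 := by
        rw [← hk0e]
        exact List.count_map_of_injective ks pvEmb pvEmb_injective k0
      simp only [pvMaxD]
      have hk0s : k0 ∈ s := hperm.mem_iff.mpr hk0
      have h1 : m ≤ (s.foldl pvScanStep (0, 0, none)).1 := by
        have hu := hub k0 hk0s
        rw [hperm.count_eq] at hu
        rw [← hmkk] at *
        rw [hcnt]
        exact hu
      have h2 : (s.foldl pvScanStep (0, 0, none)).1 ≤ m := by
        have hjks : j ∈ ks := hperm.mem_iff.mp hj
        have hofl : pvEmb j ∈ PySem.Set.ofList (ks.map pvEmb) :=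
          (PySem.Set.mem_ofList _ _).mpr (List.mem_map_of_mem hjks)
        have hx : (((ks.map pvEmb).count (pvEmb j) : Nat) : Int) ∈
            (PySem.Set.ofList (ks.map pvEmb)).map (fun k => (((ks.map pvEmb).count k : Nat) : Int)) :=
          List.mem_map_of_mem hofl
        have hle := hmub _ hx
        have hcj : (ks.map pvEmb).count (pvEmb j) = ks.count j :=
          List.count_map_of_injective ks pvEmb pvEmb_injective j
        rw [hbest, hperm.count_eq]
        rw [hcj] at hle
        exact hle
      omega

-- ===== VERDICT (by name: the statement is the Claim_ definition above) =====
theorem maximize_zeroes_in_array_spec : Claim_equal_maximize_zeroes_in_array := by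
  intro n a b _dom _pre
  unfold Spec_maximize_zeroes_in_array
  rw [pvPortA_char, pvPortB_char, pvCore]
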